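-- pv_equiv track=rewrite | github.com/caizizhen/Cai_Agent | cai-agent/src/cai_agent/workflow.py | _merge_decision_for_strategy
-- ===== SOURCE A (Python) =====
-- from typing import Any, Dict, List, Optional, TypedDict
--
-- ROLE_RANK = {"default": 1, "explorer": 2, "reviewer": 3, "security": 4}
--
-- def _answers_by_name(results: List[Dict[str, Any]]) -> dict[str, list[tuple[str, str, int]]]:
--     """name -> [(answer, role, index), ...] 按步骤顺序."""
--     m: dict[str, list[tuple[str, str, int]]] = {}
--     for r in results:
--         n = str(r.get("name", "")).strip()
--         if not n:
--             continue
--         a = str(r.get("answer", "")).strip()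
--         role = str(r.get("role") or "default").strip().lower()
--         idx = int(r.get("index") or 0)
--         m.setdefault(n, []).append((a, role, idx))
--     return m
--
-- def _merge_decision_for_strategy(
--     strategy: str,
--     conflicts: list[dict[str, Any]],
--     results: List[Dict[str, Any]],
-- ) -> str:
--     if not conflicts:
--         return "auto_merge"
--     s = strategy.strip().lower()
--     if s == "last_wins":
--         return "last_wins"
--     if s == "role_priority":
--         by_n = _answers_by_name(results)
--         for c in conflicts:
--             name = str(c.get("name", ""))
--             lst = by_n.get(name) or []
--             scores: dict[str, int] = {}
--             for ans, role, _ in lst: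
--                 rk = ROLE_RANK.get(role, 1)
--                 scores[ans] = max(scores.get(ans, 0), rk)
--             if len(scores) < 2:
--                 continue
--             mx = max(scores.values())
--             tops = [a for a, sc in scores.items() if sc == mx]
--             if len(tops) != 1:
--                 return "manual_review_role_tie"
--         return "role_priority"
--     return "manual_review"
-- ===== SOURCE B (Python) =====
-- ROLE_RANK = {"default": 1, "explorer": 2, "reviewer": 3, "security": 4}
--
-- def _merge_decision_for_strategy(strategy, conflicts, results):
--     if not conflicts:
--         return "auto_merge"
--     s = strategy.strip().lower()
--     if s == "last_wins":
--         return "last_wins"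
--     if s != "role_priority":
--         return "manual_review"
--     for c in conflicts:
--         name = str(c.get("name", ""))
--         # compute this conflict's role scores by scanning results directly,
--         # with no prebuilt name index and no unused index-field parsing
--         scores = {}
--         for r in results:
--             n = str(r.get("name", "")).strip()
--             if not n or n != name:
--                 continue
--             a = str(r.get("answer", "")).strip()
--             role = str(r.get("role") or "default").strip().lower()
--             scores[a] = max(scores.get(a, 0), ROLE_RANK.get(role, 1))
--         if len(scores) < 2:
--             continue
--         mx = max(scores.values())
--         tops = [a for a, sc in scores.items() if sc == mx]
--         if len(tops) != 1:
--             return "manual_review_role_tie"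
--     return "role_priority"
-- ===== Notes on version B (the rewrite author's own statement) =====
-- stated objective: simpler
-- what changed: B drops the _answers_by_name prebuilt name->entries index (and its unused int(index) parsing) and instead computes each conflict's role scores by scanning results directly inside the conflict loop, keeping the outer guards and tie logic unchanged.
import Mathlib
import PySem

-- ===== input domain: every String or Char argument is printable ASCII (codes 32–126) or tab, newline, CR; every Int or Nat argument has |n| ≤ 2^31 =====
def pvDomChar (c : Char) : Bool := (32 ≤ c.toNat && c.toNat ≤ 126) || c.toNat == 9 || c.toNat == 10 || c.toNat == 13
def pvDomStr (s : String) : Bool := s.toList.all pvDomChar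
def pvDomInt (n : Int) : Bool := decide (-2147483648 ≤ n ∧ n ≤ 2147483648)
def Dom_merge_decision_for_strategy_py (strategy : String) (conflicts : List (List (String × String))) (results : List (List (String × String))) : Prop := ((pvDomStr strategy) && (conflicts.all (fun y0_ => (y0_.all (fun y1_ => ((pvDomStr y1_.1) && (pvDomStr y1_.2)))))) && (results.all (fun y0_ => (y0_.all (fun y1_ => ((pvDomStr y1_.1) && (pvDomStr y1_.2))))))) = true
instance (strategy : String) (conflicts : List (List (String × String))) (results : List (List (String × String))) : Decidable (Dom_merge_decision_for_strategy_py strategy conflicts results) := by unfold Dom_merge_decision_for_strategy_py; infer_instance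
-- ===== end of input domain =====

-- B replaces A's prebuilt name->answers index (and its unused int(index) parsing) by a direct
-- per-conflict scan of results; objective: simpler.  Equivalence is over return values on Pre_
-- (A raises ValueError on unparseable 'index' fields, B does not parse them).

-- shared field accessors (the same str()/get coercions both Pythons write inline)
def pvGet (r : List (String × String)) (k : String) : String :=
  PySem.Dict.getD (PySem.Dict.mk r) k ""

def pvRole (r : List (String × String)) : String :=
  PySem.Str.lower (PySem.Str.strip
    (match PySem.Dict.get? (PySem.Dict.mk r) "role" with
     | some s => if s == "" then "default" else s
     | none => "default"))

-- int(r.get("index") or 0): none = ValueError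
def pvIdx? (r : List (String × String)) : Option Int :=
  match PySem.Dict.get? (PySem.Dict.mk r) "index" with
  | some s => if s == "" then some 0 else PySem.Int.ofStr? s
  | none => some 0

def pvRoleRank : PySem.Dict String Int :=
  PySem.Dict.ofList [("default", 1), ("explorer", 2), ("reviewer", 3), ("security", 4)]

-- scores[ans] = max(scores.get(ans, 0), ROLE_RANK.get(role, 1))
def pvScoreUpd (sc : PySem.Dict String Int) (a role : String) : PySem.Dict String Int :=
  sc.insert a (max (sc.getD a 0) (pvRoleRank.getD role 1))

-- the identical tail of both inner loops: len<2 -> skip, max value, tops tie test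
def pvTie (scores : PySem.Dict String Int) : Bool :=
  if scores.size < 2 then false
  else
    let mx := (PySem.List.max? scores.values (fun x => x)).getD 0
    let tops := (scores.items.filter (fun p => p.2 == mx)).map (·.1)
    tops.length != 1

-- ===== PORT A =====
-- _answers_by_name; Option because int() may raise ValueError
def pvAnswersByName : List (List (String × String)) → PySem.Dict String (List (String × String × Int)) → Option (PySem.Dict String (List (String × String × Int)))
  | [], m => some m
  | r :: rest, m =>
    let n := PySem.Str.strip (pvGet r "name")
    if n == "" then pvAnswersByName rest m
    else
      let a := PySem.Str.strip (pvGet r "answer")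
      let role := pvRole r
      match pvIdx? r with
      | none => none
      | some idx =>
          pvAnswersByName rest (PySem.Dict.modify m n [] (· ++ [(a, role, idx)]))

def pvALoop (by_n : PySem.Dict String (List (String × String × Int))) : List (List (String × String)) → String
  | [] => "role_priority"
  | c :: rest =>
    let name := pvGet c "name"
    let lst := by_n.getD name []
    let scores := lst.foldl (fun sc e => pvScoreUpd sc e.1 e.2.1) PySem.Dict.empty
    if pvTie scores then "manual_review_role_tie" else pvALoop by_n rest

def merge_decision_for_strategy_py (strategy : String) (conflicts : List (List (String × String))) (results : List (List (String × String))) : String :=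
  if conflicts.isEmpty then "auto_merge"
  else
    let s := PySem.Str.lower (PySem.Str.strip strategy)
    if s == "last_wins" then "last_wins"
    else if s == "role_priority" then
      match pvAnswersByName results PySem.Dict.empty with
      | none => ""  -- int() raised ValueError here; excluded by Pre_
      | some by_n => pvALoop by_n conflicts
    else "manual_review"

-- ===== PORT B =====
def pvBScores (name : String) (results : List (List (String × String))) : PySem.Dict String Int :=
  results.foldl (fun sc r =>
    let n := PySem.Str.strip (pvGet r "name")
    if n == "" || n != name then sc
    else pvScoreUpd sc (PySem.Str.strip (pvGet r "answer")) (pvRole r)) PySem.Dict.empty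

def pvBLoop (results : List (List (String × String))) : List (List (String × String)) → String
  | [] => "role_priority"
  | c :: rest =>
    let scores := pvBScores (pvGet c "name") results
    if pvTie scores then "manual_review_role_tie" else pvBLoop results rest

def merge_decision_for_strategy_py_alt (strategy : String) (conflicts : List (List (String × String))) (results : List (List (String × String))) : String :=
  if conflicts.isEmpty then "auto_merge"
  else
    let s := PySem.Str.lower (PySem.Str.strip strategy)
    if s == "last_wins" then "last_wins"
    else if s != "role_priority" then "manual_review"
    else pvBLoop results conflicts

-- ===== PRECONDITION & SPEC =====
-- Pre_ excludes exactly the inputs where A raises ValueError: the role_priority branch is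
-- reached and some named result carries a nonempty 'index' string int() cannot parse.
def Pre_merge_decision_for_strategy_py (strategy : String) (conflicts : List (List (String × String))) (results : List (List (String × String))) : Prop :=
  conflicts = [] ∨ PySem.Str.lower (PySem.Str.strip strategy) ≠ "role_priority" ∨
    ∀ r ∈ results, PySem.Str.strip (pvGet r "name") ≠ "" → pvIdx? r ≠ none
instance (strategy : String) (conflicts : List (List (String × String))) (results : List (List (String × String))) : Decidable (Pre_merge_decision_for_strategy_py strategy conflicts results) := by unfold Pre_merge_decision_for_strategy_py; infer_instance

def pvWitness_merge_decision_for_strategy_py : String × (List (List (String × String))) × (List (List (String × String))) :=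
  ("role_priority", [[("name", "x")]], [[("name", "x"), ("answer", "a"), ("role", "reviewer"), ("index", "1")]])

def Spec_merge_decision_for_strategy_py (strategy : String) (conflicts : List (List (String × String))) (results : List (List (String × String))) (out : String) : Prop := out = merge_decision_for_strategy_py_alt strategy conflicts results
instance (strategy : String) (conflicts : List (List (String × String))) (results : List (List (String × String))) (out : String) : Decidable (Spec_merge_decision_for_strategy_py strategy conflicts results out) := by unfold Spec_merge_decision_for_strategy_py; infer_instance

-- ===== CLAIM (what is proved, stated in full; the proofs are below) =====
def Claim_equal_merge_decision_for_strategy_py : Prop := ∀ (strategy : String) (conflicts : List (List (String × String))) (results : List (List (String × String))), Dom_merge_decision_for_strategy_py strategy conflicts results → Pre_merge_decision_for_strategy_py strategy conflicts results → Spec_merge_decision_for_strategy_py strategy conflicts results (merge_decision_for_strategy_py strategy conflicts results)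

-- ===== LEMMAS AND PROOFS =====

-- the total fold A's helper performs once int() is known not to raise
def pvAStep (m : PySem.Dict String (List (String × String × Int))) (r : List (String × String)) : PySem.Dict String (List (String × String × Int)) :=
  let n := PySem.Str.strip (pvGet r "name")
  if n == "" then m
  else PySem.Dict.modify m n [] (· ++ [(PySem.Str.strip (pvGet r "answer"), pvRole r, (pvIdx? r).getD 0)])

theorem pvAnswersByName_eq (results : List (List (String × String)))
    (h : ∀ r ∈ results, PySem.Str.strip (pvGet r "name") ≠ "" → pvIdx? r ≠ none) :
    ∀ m, pvAnswersByName results m = some (results.foldl pvAStep m) := by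
  induction results with
  | nil => intro m; rfl
  | cons r rest ih =>
    intro m
    have hr := h r (by simp)
    have hrest : ∀ r ∈ rest, PySem.Str.strip (pvGet r "name") ≠ "" → pvIdx? r ≠ none := by
      intro x hx; exact h x (by simp [hx])
    simp only [pvAnswersByName, List.foldl_cons, pvAStep]
    by_cases hn : PySem.Str.strip (pvGet r "name") = ""
    · simp [hn, ih hrest]
    · have := hr hn
      cases hidx : pvIdx? r with
      | none => exact absurd hidx this
      | some v => simp [hn, hidx, ih hrest]

def pvMatch (name : String) (r : List (String × String)) : Bool :=
  let n := PySem.Str.strip (pvGet r "name")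
  !(n == "") && n == name

theorem pvFold_getD (name : String) (results : List (List (String × String))) :
    ∀ m, (results.foldl pvAStep m).getD name [] =
      m.getD name [] ++ (results.filter (pvMatch name)).map
        (fun r => (PySem.Str.strip (pvGet r "answer"), pvRole r, (pvIdx? r).getD 0)) := by
  induction results with
  | nil => intro m; simp
  | cons r rest ih =>
    intro m
    simp only [List.foldl_cons, List.filter_cons]
    by_cases hn : PySem.Str.strip (pvGet r "name") = ""
    · simp [pvAStep, pvMatch, hn, ih]
    · by_cases hname : PySem.Str.strip (pvGet r "name") = name
      · have hne : name ≠ "" := by rw [← hname]; exact hn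
        simp [pvAStep, pvMatch, hn, hname, hne, ih, PySem.Dict.getD_modify_self,
              List.append_assoc]
      · have hne' : name ≠ PySem.Str.strip (pvGet r "name") := fun he => hname he.symm
        simp only [pvAStep, pvMatch, ih]
        rw [if_neg (by simp [hn]), PySem.Dict.getD_modify]
        simp [hne', hname, hn]

theorem pvBScores_filter (name : String) (results : List (List (String × String))) :
    ∀ sc, results.foldl (fun sc r =>
      let n := PySem.Str.strip (pvGet r "name")
      if n == "" || n != name then sc
      else pvScoreUpd sc (PySem.Str.strip (pvGet r "answer")) (pvRole r)) sc =
    (results.filter (pvMatch name)).foldl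
      (fun sc r => pvScoreUpd sc (PySem.Str.strip (pvGet r "answer")) (pvRole r)) sc := by
  induction results with
  | nil => intro sc; rfl
  | cons r rest ih =>
    intro sc
    rw [List.foldl_cons]
    by_cases hn : PySem.Str.strip (pvGet r "name") = ""
    · rw [List.filter_cons_of_neg (by simp [pvMatch, hn])]
      have hstep : (let n := PySem.Str.strip (pvGet r "name")
          if (n == "" || n != name) = true then sc
          else pvScoreUpd sc (PySem.Str.strip (pvGet r "answer")) (pvRole r)) = sc := by
        simp [hn]
      rw [hstep]
      exact ih sc
    · by_cases hname : PySem.Str.strip (pvGet r "name") = name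
      · rw [List.filter_cons_of_pos (by simp [pvMatch, hname]; exact hname ▸ hn)]
        have hstep : (let n := PySem.Str.strip (pvGet r "name")
          if (n == "" || n != name) = true then sc
          else pvScoreUpd sc (PySem.Str.strip (pvGet r "answer")) (pvRole r)) = pvScoreUpd sc (PySem.Str.strip (pvGet r "answer")) (pvRole r) := by
          simp [hn, hname, hname ▸ hn]
        rw [hstep, List.foldl_cons]
        exact ih _
      · rw [List.filter_cons_of_neg (by simp [pvMatch, hname])]
        have hstep : (let n := PySem.Str.strip (pvGet r "name")
          if (n == "" || n != name) = true then sc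
          else pvScoreUpd sc (PySem.Str.strip (pvGet r "answer")) (pvRole r)) = sc := by
          simp [hn, hname]
        rw [hstep]
        exact ih sc

theorem pvScores_eq (name : String) (results : List (List (String × String))) :
    ((results.foldl pvAStep PySem.Dict.empty).getD name []).foldl
      (fun sc e => pvScoreUpd sc e.1 e.2.1) PySem.Dict.empty = pvBScores name results := by
  rw [pvFold_getD]
  have hempty : (PySem.Dict.empty : PySem.Dict String (List (String × String × Int))).getD name [] = [] := rfl
  rw [hempty, List.nil_append, List.foldl_map]
  unfold pvBScores
  rw [pvBScores_filter]

theorem pvLoops_eq (results : List (List (String × String))) (by_n : PySem.Dict String (List (String × String × Int)))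
    (h : ∀ name, (by_n.getD name []).foldl (fun sc e => pvScoreUpd sc e.1 e.2.1) PySem.Dict.empty = pvBScores name results) :
    ∀ conflicts, pvALoop by_n conflicts = pvBLoop results conflicts := by
  intro conflicts
  induction conflicts with
  | nil => rfl
  | cons c rest ih =>
    simp only [pvALoop, pvBLoop, h (pvGet c "name"), ih]

-- ===== VERDICT (by name: the statement is the Claim_ definition above) =====
theorem merge_decision_for_strategy_py_spec : Claim_equal_merge_decision_for_strategy_py := by
  intro strategy conflicts results _ hpre
  unfold Spec_merge_decision_for_strategy_py
  unfold merge_decision_for_strategy_py merge_decision_for_strategy_py_alt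
  by_cases hc : conflicts.isEmpty
  · simp [hc]
  · simp only [hc, if_false]
    by_cases hlw : PySem.Str.lower (PySem.Str.strip strategy) = "last_wins"
    · simp [hlw]
    · by_cases hrp : PySem.Str.lower (PySem.Str.strip strategy) = "role_priority"
      · have hidx : ∀ r ∈ results, PySem.Str.strip (pvGet r "name") ≠ "" → pvIdx? r ≠ none := by
          rcases hpre with h | h | h
          · exact absurd (by simp [h]) hc
          · exact absurd hrp h
          · exact h
        rw [pvAnswersByName_eq results hidx]
        simp [hlw, hrp]
        exact pvLoops_eq results _ (fun name => pvScores_eq name results) conflicts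
      · simp [hlw, hrp]
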